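-- pv_equiv track=rewrite | github.com/c42meitheal-collab/simviator-microservices | services/simviator/aviation_pronunciation.py | _pronounce_flight_level_number
-- ===== SOURCE A (Python) =====
-- AVIATION_NUMBERS = {
--     '0': 'Zero', '1': 'One', '2': 'Two', '3': 'Three', '4': 'Four',
--     '5': 'Five', '6': 'Six', '7': 'Seven', '8': 'Eight', '9': 'Niner'
-- }
--
-- def _pronounce_flight_level_number(fl_number: int) -> str:
--     """Pronounce flight level numbers properly"""
--     if fl_number < 10:
--         return f"Zero {AVIATION_NUMBERS[str(fl_number)]}"
--     elif fl_number < 100: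
--         tens = fl_number // 10
--         ones = fl_number % 10
--         if ones == 0:
--             # For round tens (20, 30, etc.)
--             return f"{AVIATION_NUMBERS[str(tens)]} Zero"
--         else:
--             return f"{AVIATION_NUMBERS[str(tens)]} {AVIATION_NUMBERS[str(ones)]}"
--     else:
--         # For 100+, read as individual digits
--         fl_str = str(fl_number)
--         digits = [AVIATION_NUMBERS[d] for d in fl_str]
--         return ' '.join(digits)
-- ===== SOURCE B (Python) =====
-- AVIATION_NUMBERS = {
--     '0': 'Zero', '1': 'One', '2': 'Two', '3': 'Three', '4': 'Four',
--     '5': 'Five', '6': 'Six', '7': 'Seven', '8': 'Eight', '9': 'Niner'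
-- }
--
--
-- def _pronounce_flight_level_number(fl_number: int) -> str:
--     """Pronounce flight level numbers properly"""
--     s = str(fl_number).zfill(2)
--     return ' '.join(AVIATION_NUMBERS[d] for d in s)
-- ===== Notes on version B (the rewrite author's own statement) =====
-- stated objective: simpler
-- what changed: Replaces A's three magnitude branches (units with a hard-coded 'Zero' prefix, tens with floordiv/mod and a round-tens sub-branch, 100+ digit join) by one uniform pass: zero-pad str(fl_number) to two digits and join the phonetic word of each digit.
import Mathlib
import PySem

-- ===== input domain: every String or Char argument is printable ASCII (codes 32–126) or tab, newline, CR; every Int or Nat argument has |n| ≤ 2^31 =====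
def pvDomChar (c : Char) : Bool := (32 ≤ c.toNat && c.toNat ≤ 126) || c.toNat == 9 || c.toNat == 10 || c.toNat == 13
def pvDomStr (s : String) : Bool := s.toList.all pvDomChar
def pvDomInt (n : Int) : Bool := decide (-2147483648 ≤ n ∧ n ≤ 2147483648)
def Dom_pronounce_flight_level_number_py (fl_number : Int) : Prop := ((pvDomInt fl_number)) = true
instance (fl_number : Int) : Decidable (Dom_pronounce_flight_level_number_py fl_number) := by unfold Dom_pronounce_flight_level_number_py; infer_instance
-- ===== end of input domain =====

-- B collapses A's three magnitude branches into one uniform pass: zero-pad str(n) to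
-- two digits and join each digit's phonetic word (objective: simpler).

-- shared module-level constant AVIATION_NUMBERS
def avnDict : PySem.Dict String String :=
  PySem.Dict.ofList [("0", "Zero"), ("1", "One"), ("2", "Two"), ("3", "Three"), ("4", "Four"),
    ("5", "Five"), ("6", "Six"), ("7", "Seven"), ("8", "Eight"), ("9", "Niner")]

-- ===== PORT A =====
def pronounce_flight_level_number_py (fl_number : Int) : String :=
  if fl_number < 10 then
    "Zero " ++ PySem.Dict.getD avnDict (PySem.Int.toStr fl_number) ""
  else if fl_number < 100 then
    let tens := PySem.Int.floordiv fl_number 10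
    let ones := PySem.Int.mod fl_number 10
    if ones = 0 then
      PySem.Dict.getD avnDict (PySem.Int.toStr tens) "" ++ " Zero"
    else
      PySem.Dict.getD avnDict (PySem.Int.toStr tens) "" ++ " " ++
        PySem.Dict.getD avnDict (PySem.Int.toStr ones) ""
  else
    let fl_str := PySem.Int.toStr fl_number
    let digits := fl_str.toList.map (fun d => PySem.Dict.getD avnDict (String.ofList [d]) "")
    PySem.Str.join " " digits

-- ===== PORT B =====
def pronounce_flight_level_number_py_alt (fl_number : Int) : String :=
  let s := PySem.Str.zfill (PySem.Int.toStr fl_number) 2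
  PySem.Str.join " " (s.toList.map (fun d => PySem.Dict.getD avnDict (String.ofList [d]) ""))

-- ===== PRECONDITION & SPEC =====
-- Pre_ excludes negative fl_number, on which both A and B raise KeyError ('-' is not a digit key).
def Pre_pronounce_flight_level_number_py (fl_number : Int) : Prop := 0 ≤ fl_number
instance (fl_number : Int) : Decidable (Pre_pronounce_flight_level_number_py fl_number) := by
  unfold Pre_pronounce_flight_level_number_py; infer_instance

def pvWitness_pronounce_flight_level_number_py : Int := 250

def Spec_pronounce_flight_level_number_py (fl_number : Int) (out : String) : Prop :=
  out = pronounce_flight_level_number_py_alt fl_number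
instance (fl_number : Int) (out : String) :
    Decidable (Spec_pronounce_flight_level_number_py fl_number out) := by
  unfold Spec_pronounce_flight_level_number_py; infer_instance

-- ===== CLAIM (what is proved, stated in full; the proofs are below) =====
def Claim_equal_pronounce_flight_level_number_py : Prop :=
  ∀ (fl_number : Int), Dom_pronounce_flight_level_number_py fl_number →
    Pre_pronounce_flight_level_number_py fl_number →
    Spec_pronounce_flight_level_number_py fl_number (pronounce_flight_level_number_py fl_number)

-- ===== LEMMAS AND PROOFS =====

-- toDigitsCore never shrinks the accumulator
lemma toDigitsCore_len_le (b : Nat) : ∀ (f m : Nat) (l : List Char),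
    l.length ≤ (Nat.toDigitsCore b f m l).length := by
  intro f
  induction f with
  | zero => intro m l; simp [Nat.toDigitsCore]
  | succ f ih =>
    intro m l
    rw [Nat.toDigitsCore]
    split
    · simp
    · exact le_trans (by simp) (ih _ _)

-- a natural number ≥ 10 has at least two decimal digits
lemma two_le_toDigits_len (n : Nat) (h : 10 ≤ n) : 2 ≤ (Nat.toDigits 10 n).length := by
  obtain ⟨k, rfl⟩ : ∃ k, n = k + 1 := ⟨n - 1, by omega⟩
  show 2 ≤ (Nat.toDigitsCore 10 (k + 1 + 1) (k + 1) []).length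
  rw [Nat.toDigitsCore]
  have h10 : ¬ (k + 1) / 10 = 0 := by omega
  simp only [h10, if_false]
  rw [Nat.toDigitsCore]
  split
  · simp
  · exact le_trans (by simp) (toDigitsCore_len_le _ _ _ _)

lemma zfill_toChars_of_ge (n : Int) (h : 100 ≤ n) :
    PySem.Chars.zfill (PySem.Int.toChars n) 2 = PySem.Int.toChars n := by
  have hlen : 2 ≤ (PySem.Int.toChars n).length := by
    unfold PySem.Int.toChars
    rw [if_neg (by omega)]
    exact two_le_toDigits_len _ (by omega)
  unfold PySem.Chars.zfill
  rw [if_pos (by exact_mod_cast hlen)]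

-- ===== VERDICT (by name: the statement is the Claim_ definition above) =====
theorem pronounce_flight_level_number_py_spec : Claim_equal_pronounce_flight_level_number_py := by
  intro fl hdom hpre
  unfold Spec_pronounce_flight_level_number_py
  by_cases hlt : fl < 100
  · -- 0 ≤ fl < 100: finitely many cases
    unfold Pre_pronounce_flight_level_number_py at hpre
    interval_cases fl <;> decide
  · -- fl ≥ 100: the zero-pad is the identity and both sides join the same digit words
    have h100 : 100 ≤ fl := by omega
    unfold pronounce_flight_level_number_py pronounce_flight_level_number_py_alt
    rw [if_neg (by omega), if_neg (by omega)]
    have hz : (PySem.Str.zfill (PySem.Int.toStr fl) 2).toList = (PySem.Int.toStr fl).toList := by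
      simp [PySem.Str.toList_zfill, PySem.Int.toList_toStr, zfill_toChars_of_ge fl h100]
    simp only [hz]
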